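-- pv_equiv track=rewrite | github.com/YsarionQT/GlobalLogic | program.py | calc
-- ===== SOURCE A (Python) =====
-- from typing import List
--
-- def calc(arr: List[str]) -> List[str]:
--     """
--     Takes all elements and compares them
--     """
--     if len(arr) == 1 or len(arr) == 0:
--         return arr
--     if arr[0] == arr[-1]:
--         arr.pop(0)
--         arr.pop(-1)
--         return calc(arr)
--     return arr
-- ===== SOURCE B (Python) =====
-- def calc(arr):
--     i, j = 0, len(arr) - 1
--     while i < j and arr[i] == arr[j]:
--         i += 1
--         j -= 1
--     return arr[i:j + 1]
-- ===== Notes on version B (the rewrite author's own statement) =====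
-- stated objective: alternative
-- what changed: Recursive pop-from-both-ends on a mutated list is replaced by an iterative two-pointer scan from both ends that returns the middle slice without mutating the input.
import Mathlib
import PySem

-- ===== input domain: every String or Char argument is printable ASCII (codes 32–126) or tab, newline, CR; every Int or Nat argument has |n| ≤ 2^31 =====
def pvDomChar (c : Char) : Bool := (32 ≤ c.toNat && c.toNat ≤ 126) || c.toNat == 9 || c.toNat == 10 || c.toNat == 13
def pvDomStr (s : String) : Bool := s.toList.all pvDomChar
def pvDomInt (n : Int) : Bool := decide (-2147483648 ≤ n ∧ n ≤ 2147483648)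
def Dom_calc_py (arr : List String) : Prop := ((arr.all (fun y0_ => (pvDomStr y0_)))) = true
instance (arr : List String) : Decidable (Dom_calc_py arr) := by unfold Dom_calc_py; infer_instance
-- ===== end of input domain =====

-- B replaces A's recursive double-pop (which mutates its argument in place) by a two-pointer
-- scan returning the middle slice (no mutation); the equivalence proved is about the RETURN value only.

-- ===== PORT A =====
-- A: if len ≤ 1 return arr; if arr[0] == arr[-1], pop front and back and recurse; else return arr.
def calc_py (arr : List String) : List String :=
  if arr.length = 1 ∨ arr.length = 0 then arr
  else if PySem.List.pyGet? arr 0 = PySem.List.pyGet? arr (-1) then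
    -- arr.pop(0) then arr.pop(-1): the list becomes arr.tail.dropLast
    calc_py (arr.tail.dropLast)
  else arr
termination_by arr.length
decreasing_by
  simp only [List.length_dropLast, List.length_tail]
  omega

-- ===== PORT B =====
-- while i < j and arr[i] == arr[j]: i += 1; j -= 1
def calcLoop (arr : List String) (i j : Int) : Int × Int :=
  if i < j ∧ PySem.List.pyGet? arr i = PySem.List.pyGet? arr j then
    calcLoop arr (i + 1) (j - 1)
  else (i, j)
termination_by (j - i).toNat
decreasing_by omega

def calc_py_alt (arr : List String) : List String :=
  PySem.List.slice arr (some (calcLoop arr 0 ((arr.length : Int) - 1)).1)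
    (some ((calcLoop arr 0 ((arr.length : Int) - 1)).2 + 1))

-- ===== PRECONDITION & SPEC =====
def Spec_calc_py (arr : List String) (out : List String) : Prop := out = calc_py_alt arr
instance (arr : List String) (out : List String) : Decidable (Spec_calc_py arr out) := by unfold Spec_calc_py; infer_instance

-- ===== CLAIM (what is proved, stated in full; the proofs are below) =====
def Claim_equal_calc_py : Prop := ∀ (arr : List String), Dom_calc_py arr → Spec_calc_py arr (calc_py arr)

-- ===== LEMMAS AND PROOFS =====

-- bounds on the loop's result
theorem calcLoop_post (arr : List String) (i j : Int) :
    i ≤ (calcLoop arr i j).1 ∧ (calcLoop arr i j).2 ≤ j ∧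
    (i ≤ j + 1 → (calcLoop arr i j).1 ≤ (calcLoop arr i j).2 + 1) := by
  fun_induction calcLoop arr i j with
  | case1 i j h ih =>
      obtain ⟨h1, h2, h3⟩ := ih
      exact ⟨by omega, by omega, fun _ => h3 (by omega)⟩
  | case2 i j h => exact ⟨le_refl _, le_refl _, fun h' => by omega⟩

-- loop exits at once when the condition fails
theorem calcLoop_stop (arr : List String) (i j : Int)
    (h : ¬ (i < j ∧ PySem.List.pyGet? arr i = PySem.List.pyGet? arr j)) :
    calcLoop arr i j = (i, j) := by
  rw [calcLoop, if_neg h]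

theorem calc_py_alt_short (arr : List String) (h : arr.length ≤ 1) :
    calc_py_alt arr = arr := by
  match arr, h with
  | [], _ =>
      unfold calc_py_alt
      rw [calcLoop_stop _ _ _ (by simp)]
      decide
  | [x], _ =>
      unfold calc_py_alt
      rw [calcLoop_stop _ _ _ (by simp)]
      norm_num
      rw [show (1 : Int) = ((1 : Nat) : Int) by norm_num, PySem.List.slice_to_natCast]
      simp

theorem calc_py_alt_stop (arr : List String) (hlen : 2 ≤ arr.length)
    (h : PySem.List.pyGet? arr 0 ≠ PySem.List.pyGet? arr (-1)) :
    calc_py_alt arr = arr := by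
  unfold calc_py_alt
  have hl : PySem.List.pyGet? arr ((arr.length : Int) - 1) = PySem.List.pyGet? arr (-1) := by
    rw [show ((arr.length : Int) - 1) = ((arr.length - 1 : Nat) : Int) by omega,
      PySem.List.pyGet?_natCast, PySem.List.pyGet?_neg_one, List.getLast?_eq_getElem?]
  rw [calcLoop_stop _ _ _ (by rw [hl]; tauto)]
  norm_num

-- indices 1..mid.length of x :: mid ++ [y] read mid
theorem pyGet?_shift (x y : String) (mid : List String) (i : Int)
    (h0 : 0 ≤ i) (h1 : i < (mid.length : Int)) :
    PySem.List.pyGet? (x :: (mid ++ [y])) (i + 1) = PySem.List.pyGet? mid i := by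
  rw [PySem.List.pyGet?_of_nonneg _ (by omega : (0:Int) ≤ i + 1),
    PySem.List.pyGet?_of_nonneg _ h0]
  rw [show (i + 1).toNat = i.toNat + 1 by omega]
  simp only [List.getElem?_cons_succ]
  rw [List.getElem?_append_left (by omega)]

-- the loop on x :: mid ++ [x] starting at shifted indices is the loop on mid, shifted
theorem calcLoop_shift (x : String) (mid : List String) (i j : Int)
    (h0 : 0 ≤ i) (h1 : j ≤ (mid.length : Int) - 1) :
    calcLoop (x :: (mid ++ [x])) (i + 1) (j + 1) =
      ((calcLoop mid i j).1 + 1, (calcLoop mid i j).2 + 1) := by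
  fun_induction calcLoop mid i j with
  | case1 i j h ih =>
      obtain ⟨hij, heq⟩ := h
      rw [calcLoop, if_pos ?_]
      · rw [show (j + 1 - 1 : Int) = (j - 1) + 1 by ring]
        exact ih (by omega) (by omega)
      · refine ⟨by omega, ?_⟩
        rw [pyGet?_shift _ _ _ _ h0 (by omega), pyGet?_shift _ _ _ _ (by omega) (by omega)]
        exact heq
  | case2 i j h =>
      rw [calcLoop_stop]
      intro ⟨hij, heq⟩
      refine h ⟨by omega, ?_⟩
      rw [pyGet?_shift _ _ _ _ h0 (by omega), pyGet?_shift _ _ _ _ (by omega) (by omega)] at heq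
      exact heq

theorem slice_shift (x y : String) (mid : List String) (a c : Int)
    (h0 : 0 ≤ a) (h1 : a ≤ c) (h2 : c ≤ (mid.length : Int)) :
    PySem.List.slice (x :: (mid ++ [y])) (some (a + 1)) (some (c + 1)) =
      PySem.List.slice mid (some a) (some c) := by
  rw [show a + 1 = ((a.toNat + 1 : Nat) : Int) by omega,
    show c + 1 = ((c.toNat + 1 : Nat) : Int) by omega,
    PySem.List.slice_natCast,
    show a = ((a.toNat : Nat) : Int) by omega,
    show c = ((c.toNat : Nat) : Int) by omega,
    PySem.List.slice_natCast]
  simp only [List.drop_succ_cons, Int.toNat_natCast]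
  rw [List.drop_append_of_le_length (by omega),
    show c.toNat + 1 - (a.toNat + 1) = c.toNat - a.toNat by omega,
    List.take_append_of_le_length (by rw [List.length_drop]; omega)]

-- the recursive step: stripping the matching ends does not change B's result
theorem calc_py_alt_step (arr : List String) (hlen : 2 ≤ arr.length)
    (h : PySem.List.pyGet? arr 0 = PySem.List.pyGet? arr (-1)) :
    calc_py_alt arr = calc_py_alt (arr.tail.dropLast) := by
  obtain ⟨x, rest, rfl⟩ : ∃ x rest, arr = x :: rest := by
    cases arr with
    | nil => simp at hlen
    | cons a l => exact ⟨a, l, rfl⟩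
  obtain ⟨mid, y, rfl⟩ : ∃ mid y, rest = mid ++ [y] := by
    rcases List.eq_nil_or_concat rest with h' | ⟨mid, y, h'⟩
    · subst h'; simp at hlen
    · exact ⟨mid, y, by simpa using h'⟩
  have hx : x = y := by
    have e0 : PySem.List.pyGet? (x :: (mid ++ [y])) 0 = some x :=
      PySem.List.pyGet?_zero_cons x (mid ++ [y])
    have e1 : PySem.List.pyGet? (x :: (mid ++ [y])) (-1) = some y := by
      rw [show x :: (mid ++ [y]) = (x :: mid) ++ [y] by simp]
      exact PySem.List.pyGet?_neg_one_append_singleton (x :: mid) y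
    rw [e0, e1] at h
    exact Option.some.inj h
  subst hx
  rw [show (x :: (mid ++ [x])).tail.dropLast = mid by simp]
  unfold calc_py_alt
  have hcond : (0 : Int) < (mid.length : Int) + 1 ∧
      PySem.List.pyGet? (x :: (mid ++ [x])) 0 =
        PySem.List.pyGet? (x :: (mid ++ [x])) ((mid.length : Int) + 1) := by
    refine ⟨by omega, ?_⟩
    have e2 : PySem.List.pyGet? (x :: (mid ++ [x])) ((mid.length : Int) + 1) = some x := by
      rw [show x :: (mid ++ [x]) = (x :: mid) ++ x :: [] by simp,
        show ((mid.length : Int) + 1) = (((x :: mid).length : Nat) : Int) by simp]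
      exact PySem.List.pyGet?_append_length (x :: mid) [] x
    rw [e2]
    exact PySem.List.pyGet?_zero_cons x (mid ++ [x])
  have hfirst : calcLoop (x :: (mid ++ [x])) 0 ((mid.length : Int) + 1) =
      ((calcLoop mid 0 ((mid.length : Int) - 1)).1 + 1,
       (calcLoop mid 0 ((mid.length : Int) - 1)).2 + 1) := by
    rw [calcLoop, if_pos hcond,
      show ((mid.length : Int) + 1 - 1) = ((mid.length : Int) - 1) + 1 by ring]
    exact calcLoop_shift x mid 0 ((mid.length : Int) - 1) le_rfl (by omega)
  rw [show ((((x :: (mid ++ [x])).length : Nat) : Int) - 1) = (mid.length : Int) + 1 by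
    simp]
  rw [hfirst]
  obtain ⟨hp1, hp2, hp3⟩ := calcLoop_post mid 0 ((mid.length : Int) - 1)
  exact slice_shift x x mid _ _ hp1 (hp3 (by omega)) (by omega)

theorem calc_main (arr : List String) : calc_py arr = calc_py_alt arr := by
  fun_induction calc_py arr with
  | case1 arr h => exact (calc_py_alt_short arr (by omega)).symm
  | case2 arr h1 h2 ih => rw [ih, ← calc_py_alt_step arr (by omega) h2]
  | case3 arr h1 h2 => exact (calc_py_alt_stop arr (by omega) h2).symm

-- ===== VERDICT (by name: the statement is the Claim_ definition above) =====
theorem calc_py_spec : Claim_equal_calc_py := by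
  intro arr _
  exact calc_main arr
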